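-- pv_equiv track=rewrite | github.com/inkustr/sokoplan | scripts/blocks/utils/cleanup_split_files.py | _compute_non_leaf_stems
-- ===== SOURCE A (Python) =====
-- from typing import Iterable, List, Set, Tuple
--
-- def _compute_non_leaf_stems(stems: Set[str]) -> Set[str]:
--     non_leaf: Set[str] = set()
--     stems_set = set(stems)
--     for s in stems_set:
--         prefix = s + "_"
--         for t in stems_set:
--             if t.startswith(prefix):
--                 non_leaf.add(s)
--                 break
--     return non_leaf
-- ===== SOURCE B (Python) =====
-- def _compute_non_leaf_stems(stems):
--     stems_set = set(stems)
--     hit = set()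
--     for t in stems_set:
--         for i, c in enumerate(t):
--             if c == '_':
--                 hit.add(t[:i])
--     return {s for s in stems_set if s in hit}
-- ===== Notes on version B (the rewrite author's own statement) =====
-- stated objective: faster
-- what changed: Replaces the all-pairs startswith scan with one pass that collects every underscore-bounded proper prefix of each stem into a set and then filters the stems by membership in that set.
import Mathlib
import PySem

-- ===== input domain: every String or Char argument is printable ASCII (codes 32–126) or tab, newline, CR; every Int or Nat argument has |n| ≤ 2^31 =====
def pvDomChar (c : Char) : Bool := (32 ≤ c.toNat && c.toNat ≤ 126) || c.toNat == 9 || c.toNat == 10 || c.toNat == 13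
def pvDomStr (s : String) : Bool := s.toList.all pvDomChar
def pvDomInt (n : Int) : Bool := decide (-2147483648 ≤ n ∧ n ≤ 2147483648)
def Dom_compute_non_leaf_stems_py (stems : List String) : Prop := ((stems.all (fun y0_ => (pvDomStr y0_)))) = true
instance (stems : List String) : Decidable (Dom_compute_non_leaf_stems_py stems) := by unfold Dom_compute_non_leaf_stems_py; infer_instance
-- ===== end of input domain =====

-- B replaces A's all-pairs startswith scan by collecting each stem's underscore-bounded
-- prefixes into a set once and filtering the stems by membership (faster, one pass per stem).
-- Return-value equivalence is as Python sets: both ports list the same distinct elements in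
-- the same (first-occurrence) order.

-- ===== PORT A =====
-- inner 'for t in stems_set: if t.startswith(prefix): non_leaf.add(s); break'
def scanA (d : List String) (pre : String) : Bool :=
  match d with
  | [] => false
  | t :: rest => if PySem.Str.startswith t pre then true else scanA rest pre

def compute_non_leaf_stems_py (stems : List String) : List String :=
  let stems_set := PySem.Set.ofList stems
  stems_set.foldl
    (fun non_leaf s => if scanA stems_set (s ++ "_") then PySem.Set.add non_leaf s else non_leaf)
    PySem.Set.empty

-- ===== PORT B =====
-- hit = { t[:i] | t in stems_set, t[i] == '_' }
def hitB (d : List String) : PySem.Set String :=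
  d.foldl
    (fun hit t =>
      (PySem.List.enumerate t.toList 0).foldl
        (fun hit ic =>
          if ic.2 == '_' then PySem.Set.add hit (PySem.Str.slice t none (some ic.1)) else hit)
        hit)
    PySem.Set.empty

def compute_non_leaf_stems_py_alt (stems : List String) : List String :=
  let stems_set := PySem.Set.ofList stems
  let hit := hitB stems_set
  stems_set.foldl
    (fun acc s => if PySem.Set.contains hit s then PySem.Set.add acc s else acc)
    PySem.Set.empty

-- ===== PRECONDITION & SPEC =====
def Spec_compute_non_leaf_stems_py (stems : List String) (out : List String) : Prop := out = compute_non_leaf_stems_py_alt stems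
instance (stems : List String) (out : List String) : Decidable (Spec_compute_non_leaf_stems_py stems out) := by unfold Spec_compute_non_leaf_stems_py; infer_instance

-- ===== CLAIM (what is proved, stated in full; the proofs are below) =====
def Claim_equal_compute_non_leaf_stems_py : Prop := ∀ (stems : List String), Dom_compute_non_leaf_stems_py stems → Spec_compute_non_leaf_stems_py stems (compute_non_leaf_stems_py stems)

-- ===== LEMMAS AND PROOFS =====

-- a fold whose step's membership is 'old ∨ P' has membership 'init ∨ ∃ b ∈ l, P b x'
theorem foldl_mem_iff {α β : Type} (F : List α → β → List α) (P : β → α → Prop)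
    (h : ∀ acc b x, x ∈ F acc b ↔ x ∈ acc ∨ P b x) :
    ∀ (l : List β) (acc : List α) (x : α),
      x ∈ l.foldl F acc ↔ x ∈ acc ∨ ∃ b ∈ l, P b x := by
  intro l
  induction l with
  | nil => simp
  | cons b l ih =>
    intro acc x
    simp only [List.foldl_cons, ih, h, List.mem_cons]
    constructor
    · rintro ((hx | hp) | ⟨c, hc, hPc⟩)
      · exact Or.inl hx
      · exact Or.inr ⟨b, Or.inl rfl, hp⟩
      · exact Or.inr ⟨c, Or.inr hc, hPc⟩
    · rintro (hx | ⟨c, (rfl | hc), hPc⟩)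
      · exact Or.inl (Or.inl hx)
      · exact Or.inl (Or.inr hPc)
      · exact Or.inr ⟨c, hc, hPc⟩

theorem mem_hitB (d : List String) (x : String) :
    x ∈ hitB d ↔ ∃ t ∈ d, ∃ ic ∈ PySem.List.enumerate t.toList 0,
      ic.2 = '_' ∧ x = PySem.Str.slice t none (some ic.1) := by
  unfold hitB
  rw [foldl_mem_iff _
    (fun t x => ∃ ic ∈ PySem.List.enumerate t.toList 0,
      ic.2 = '_' ∧ x = PySem.Str.slice t none (some ic.1))]
  · simp [PySem.Set.empty]
  · intro acc t x
    rw [foldl_mem_iff _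
      (fun ic x => ic.2 = '_' ∧ x = PySem.Str.slice t none (some ic.1))]
    intro acc ic x
    by_cases h : ic.2 = '_'
    · simp [h, PySem.Set.mem_add]
    · simp [h]

theorem strSlice_toList (t : String) (k : Nat) :
    (PySem.Str.slice t none (some ((0 : Int) + (k : Int)))).toList = t.toList.take k := by
  have h0 : ((0 : Int) + (k : Int)) = ((k : Nat) : Int) := by omega
  rw [h0]
  simp [PySem.Str.toList_slice, PySem.List.slice_to_natCast]

theorem scanA_eq_any (d : List String) (p : String) :
    scanA d p = d.any (fun t => PySem.Str.startswith t p) := by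
  induction d with
  | nil => rfl
  | cons t rest ih =>
    rw [List.any_cons, ← ih]
    show (if PySem.Str.startswith t p then true else scanA rest p) = _
    cases PySem.Str.startswith t p <;> simp

-- the string core: t starts with s ++ "_" iff some underscore position of t cuts off exactly s
theorem prefix_underscore_iff (u cs : List Char) :
    (u ++ ['_'] <+: cs) ↔ ∃ k, k < cs.length ∧ cs[k]? = some '_' ∧ u = cs.take k := by
  constructor
  · rintro ⟨v, hv⟩
    subst hv
    refine ⟨u.length, ?_, ?_, ?_⟩
    · simp [List.length_append]
    · rw [List.append_assoc, List.getElem?_append_right (Nat.le_refl _)]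
      simp
    · rw [List.append_assoc, List.take_left]
  · rintro ⟨k, hk, hget, rfl⟩
    refine ⟨cs.drop (k + 1), ?_⟩
    have h1 : cs.take k ++ ['_'] = cs.take (k + 1) := by
      rw [List.take_add_one, hget]
      simp
    rw [h1, List.take_append_drop]

theorem cond_eq (d : List String) (s : String) :
    scanA d (s ++ "_") = PySem.Set.contains (hitB d) s := by
  rw [Bool.eq_iff_iff, scanA_eq_any, List.any_eq_true, PySem.Set.contains]
  rw [List.contains_iff_mem]
  rw [mem_hitB]
  constructor
  · rintro ⟨t, ht, hsw⟩
    rw [PySem.Str.startswith_eq, PySem.Chars.startswith_iff] at hsw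
    have hsw' : s.toList ++ ['_'] <+: t.toList := by
      simpa using hsw
    rw [prefix_underscore_iff] at hsw'
    obtain ⟨k, hk, hget, hu⟩ := hsw'
    refine ⟨t, ht, ((0 : Int) + (k : Int), t.toList[k]), ?_, ?_, ?_⟩
    · rw [PySem.List.mem_enumerate_iff]
      exact ⟨k, hk, rfl⟩
    · show t.toList[k] = '_'
      rw [List.getElem?_eq_getElem hk] at hget
      injection hget
    · apply String.toList_injective
      rw [strSlice_toList]
      exact hu
  · rintro ⟨t, ht, ic, hic, hund, hx⟩
    rw [PySem.List.mem_enumerate_iff] at hic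
    obtain ⟨k, hk, rfl⟩ := hic
    refine ⟨t, ht, ?_⟩
    rw [PySem.Str.startswith_eq, PySem.Chars.startswith_iff]
    have hxl : s.toList = t.toList.take k := by
      have := congrArg String.toList hx
      rw [strSlice_toList] at this
      exact this
    show (s ++ "_").toList <+: t.toList
    have : (s ++ "_").toList = s.toList ++ ['_'] := by simp
    rw [this, prefix_underscore_iff]
    refine ⟨k, hk, ?_, hxl⟩
    rw [List.getElem?_eq_getElem hk]
    simp at hund
    rw [hund]

-- ===== VERDICT (by name: the statement is the Claim_ definition above) =====
theorem compute_non_leaf_stems_py_spec : Claim_equal_compute_non_leaf_stems_py := by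
  intro stems _
  show compute_non_leaf_stems_py stems = compute_non_leaf_stems_py_alt stems
  show (PySem.Set.ofList stems).foldl
      (fun non_leaf s => if scanA (PySem.Set.ofList stems) (s ++ "_") then PySem.Set.add non_leaf s else non_leaf)
      PySem.Set.empty =
    (PySem.Set.ofList stems).foldl
      (fun acc s => if PySem.Set.contains (hitB (PySem.Set.ofList stems)) s then PySem.Set.add acc s else acc)
      PySem.Set.empty
  congr 1
  funext acc s
  rw [cond_eq]
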